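-- pv_equiv track=rewrite | github.com/iamsamabdullov/enigma | en/enigma.py | enigma
-- ===== SOURCE A (Python) =====
-- def enigma(text, ref, rot1, rot2, rot3):
--
--     alphabet = 'ABCDEFGHIJKLMNOPQRSTUVWXYZ'
--     rot1 =     'EKMFLGDQVZNTOWYHXUSPAIBRCJ'
--     if rot2 == 2:
--         rot2 = 'AJDKSIRUXBLHWTMCQGZNPYFVOE'
--     else:
--         rot2 = alphabet
--     if rot3 == 3:
--         rot3 = 'BDFHJLCPRTXVZNYEIWGAKMUSQO'
--     else:
--         rot3 = alphabet
--     ref = 'YRUHQSLDPXNGOKMIEBFZCWVJAT'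
--
--     txt = ''.join([t for t in text.upper() if t in alphabet])
--     trantab = txt.maketrans(alphabet, rot3)
--     x = str(txt.translate(trantab))
--     trantab1 = x.maketrans(alphabet, rot2)
--     x1 = x.translate(trantab1)
--     trantab2 = x1.maketrans(alphabet,rot1)
--     x2 = x1.translate(trantab2)
--     trantab3 = x2.maketrans(alphabet,ref)
--     x3 = x2.translate(trantab3)
--     trantab4 = x3.maketrans(rot1, alphabet)
--     x4 = x3.translate(trantab4)
--     trantab5 = x4.maketrans(rot2, alphabet)
--     x5 = x4.translate(trantab5)
--     trantab6 = x5.maketrans(rot3, alphabet)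
--     x6 = x5.translate(trantab6)
--
--     return x6
-- ===== SOURCE B (Python) =====
-- def enigma(text, ref, rot1, rot2, rot3):
--     alphabet = 'ABCDEFGHIJKLMNOPQRSTUVWXYZ'
--     r1 = 'EKMFLGDQVZNTOWYHXUSPAIBRCJ'
--     r2 = 'AJDKSIRUXBLHWTMCQGZNPYFVOE' if rot2 == 2 else alphabet
--     r3 = 'BDFHJLCPRTXVZNYEIWGAKMUSQO' if rot3 == 3 else alphabet
--     refl = 'YRUHQSLDPXNGOKMIEBFZCWVJAT'
--     # compose the seven substitution steps once, on the alphabet itself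
--     composed = alphabet
--     for src, dst in ((alphabet, r3), (alphabet, r2), (alphabet, r1),
--                      (alphabet, refl), (r1, alphabet), (r2, alphabet),
--                      (r3, alphabet)):
--         composed = composed.translate(str.maketrans(src, dst))
--     table = str.maketrans(alphabet, composed)
--     return ''.join(c for c in text.upper() if c in alphabet).translate(table)
-- ===== Notes on version B (the rewrite author's own statement) =====
-- stated objective: simpler
-- what changed: Instead of translating the text seven times, B composes the seven substitutions once on the 26-letter alphabet and applies a single precomputed translation table in one pass over the filtered text.
import Mathlib
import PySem

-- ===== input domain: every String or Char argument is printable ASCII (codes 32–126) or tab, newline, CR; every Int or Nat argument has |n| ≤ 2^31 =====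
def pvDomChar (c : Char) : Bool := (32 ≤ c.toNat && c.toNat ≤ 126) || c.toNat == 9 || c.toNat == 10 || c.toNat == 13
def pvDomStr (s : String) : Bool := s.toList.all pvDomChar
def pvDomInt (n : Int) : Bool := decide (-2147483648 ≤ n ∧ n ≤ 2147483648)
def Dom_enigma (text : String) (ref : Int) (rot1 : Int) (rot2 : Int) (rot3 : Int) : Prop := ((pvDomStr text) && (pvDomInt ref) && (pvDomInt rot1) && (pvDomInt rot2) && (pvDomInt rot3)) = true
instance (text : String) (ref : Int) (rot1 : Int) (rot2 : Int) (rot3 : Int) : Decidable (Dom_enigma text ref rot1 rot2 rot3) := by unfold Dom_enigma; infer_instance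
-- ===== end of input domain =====

-- B replaces A's seven translate passes over the text by one pass through a table
-- composed once on the alphabet (objective: simpler; return value only, no mutation).

-- ===== PORT A =====
-- str.translate(str.maketrans(src, dst)) for equal-length src/dst: first matching
-- source char wins; exact here because every source string used has distinct chars.
def pvTrans (src dst : List Char) (c : Char) : Char :=
  match src, dst with
  | s :: ss, d :: ds => if s = c then d else pvTrans ss ds c
  | _, _ => c

def enigma (text : String) (ref : Int) (rot1 : Int) (rot2 : Int) (rot3 : Int) : String :=
  let alphabet := "ABCDEFGHIJKLMNOPQRSTUVWXYZ".toList
  let r1 := "EKMFLGDQVZNTOWYHXUSPAIBRCJ".toList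
  let r2 := if rot2 = 2 then "AJDKSIRUXBLHWTMCQGZNPYFVOE".toList else alphabet
  let r3 := if rot3 = 3 then "BDFHJLCPRTXVZNYEIWGAKMUSQO".toList else alphabet
  let rf := "YRUHQSLDPXNGOKMIEBFZCWVJAT".toList
  -- [t for t in text.upper() if t in alphabet]: 't in alphabet' on a single char is char membership
  let txt := (PySem.Str.upper text).toList.filter (fun t => alphabet.contains t)
  let x  := txt.map (pvTrans alphabet r3)
  let x1 := x.map (pvTrans alphabet r2)
  let x2 := x1.map (pvTrans alphabet r1)
  let x3 := x2.map (pvTrans alphabet rf)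
  let x4 := x3.map (pvTrans r1 alphabet)
  let x5 := x4.map (pvTrans r2 alphabet)
  let x6 := x5.map (pvTrans r3 alphabet)
  String.mk x6

-- ===== PORT B =====
def enigma_alt (text : String) (ref : Int) (rot1 : Int) (rot2 : Int) (rot3 : Int) : String :=
  let alphabet := "ABCDEFGHIJKLMNOPQRSTUVWXYZ".toList
  let r1 := "EKMFLGDQVZNTOWYHXUSPAIBRCJ".toList
  let r2 := if rot2 = 2 then "AJDKSIRUXBLHWTMCQGZNPYFVOE".toList else alphabet
  let r3 := if rot3 = 3 then "BDFHJLCPRTXVZNYEIWGAKMUSQO".toList else alphabet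
  let rf := "YRUHQSLDPXNGOKMIEBFZCWVJAT".toList
  let composed := [(alphabet, r3), (alphabet, r2), (alphabet, r1), (alphabet, rf),
                   (r1, alphabet), (r2, alphabet), (r3, alphabet)].foldl
                    (fun acc p => acc.map (pvTrans p.1 p.2)) alphabet
  String.mk (((PySem.Str.upper text).toList.filter (fun c => alphabet.contains c)).map
              (pvTrans alphabet composed))

-- ===== PRECONDITION & SPEC =====
def Spec_enigma (text : String) (ref : Int) (rot1 : Int) (rot2 : Int) (rot3 : Int) (out : String) : Prop := out = enigma_alt text ref rot1 rot2 rot3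
instance (text : String) (ref : Int) (rot1 : Int) (rot2 : Int) (rot3 : Int) (out : String) : Decidable (Spec_enigma text ref rot1 rot2 rot3 out) := by unfold Spec_enigma; infer_instance

-- ===== CLAIM (what is proved, stated in full; the proofs are below) =====
def Claim_equal_enigma : Prop := ∀ (text : String) (ref : Int) (rot1 : Int) (rot2 : Int) (rot3 : Int), Dom_enigma text ref rot1 rot2 rot3 → Spec_enigma text ref rot1 rot2 rot3 (enigma text ref rot1 rot2 rot3)

-- ===== LEMMAS AND PROOFS =====

/-- Translating a char through the table built by mapping `f` over the source list
is just `f`, provided the char occurs in the source list. -/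
theorem pvTrans_map (al : List Char) (f : Char → Char) (c : Char) (h : c ∈ al) :
    pvTrans al (al.map f) c = f c := by
  induction al with
  | nil => cases h
  | cons a t ih =>
    simp only [List.map_cons, pvTrans]
    by_cases hac : a = c
    · simp [hac]
    · simp only [if_neg hac]
      exact ih (by rcases List.mem_cons.mp h with h' | h' <;> [exact absurd h'.symm hac; exact h'])

-- ===== VERDICT (by name: the statement is the Claim_ definition above) =====
theorem enigma_spec : Claim_equal_enigma := by
  unfold Claim_equal_enigma
  intro text ref rot1 rot2 rot3 _
  unfold Spec_enigma enigma enigma_alt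
  simp only [List.foldl, List.map_map]
  congr 1
  apply List.map_congr_left
  intro c hc
  have hmem : c ∈ "ABCDEFGHIJKLMNOPQRSTUVWXYZ".toList := by
    exact List.contains_iff_mem.mp (List.mem_filter.mp hc).2
  rw [pvTrans_map _ _ _ hmem]
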